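-- pv_equiv track=rewrite | github.com/Zmaroo/GithubAnalyzer | GithubAnalyzer/core/custom_parsers.py | _parse_ignore_file
-- ===== SOURCE A (Python) =====
-- from typing import Dict, Any, Optional, List
--
-- def _parse_ignore_file(content: str) -> Dict[str, Any]:
--     """Parse .gitignore or .dockerignore files"""
--     patterns = {
--         'include': [],
--         'exclude': [],
--         'comments': []
--     }
--
--     for line in content.splitlines():
--         line = line.strip()
--         if not line:
--             continue
--
--         if line.startswith('#'):
--             patterns['comments'].append(line[1:].strip())
--         elif line.startswith('!'):
--             patterns['include'].append(line[1:])
--         else: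
--             patterns['exclude'].append(line)
--
--     return patterns
-- ===== SOURCE B (Python) =====
-- def _parse_ignore_file(content: str):
--     """Parse .gitignore or .dockerignore files (three filtered passes over pre-stripped lines)"""
--     lines = [l for l in (raw.strip() for raw in content.splitlines()) if l]
--     return {
--         'include': [l[1:] for l in lines if l.startswith('!')],
--         'exclude': [l for l in lines if not l.startswith('#') and not l.startswith('!')],
--         'comments': [l[1:].strip() for l in lines if l.startswith('#')],
--     }
-- ===== Notes on version B (the rewrite author's own statement) =====
-- stated objective: alternative
-- what changed: Replaced A's single dispatching loop that mutates a three-key dict with three independent filtered passes over the pre-stripped nonempty lines, one per bucket.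
import Mathlib
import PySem

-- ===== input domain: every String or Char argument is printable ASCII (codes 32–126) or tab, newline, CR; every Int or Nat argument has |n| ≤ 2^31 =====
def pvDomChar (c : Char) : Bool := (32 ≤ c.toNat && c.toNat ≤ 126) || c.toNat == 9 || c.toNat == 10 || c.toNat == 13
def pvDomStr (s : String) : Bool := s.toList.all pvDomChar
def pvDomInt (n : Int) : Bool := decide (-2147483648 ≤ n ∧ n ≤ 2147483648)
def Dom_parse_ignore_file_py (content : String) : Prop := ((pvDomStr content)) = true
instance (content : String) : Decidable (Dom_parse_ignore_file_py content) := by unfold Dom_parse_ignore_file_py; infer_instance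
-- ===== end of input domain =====

-- B replaces A's single dispatching loop over a mutable dict by three independent
-- filtered passes over the pre-stripped nonempty lines (objective: alternative decomposition).

-- ===== PORT A =====
-- patterns[k].append(x) on the literal dict: mutate the list stored at key k in place
-- (exact for this program: the three keys are distinct and always present)
def pvAppendAt (d : List (String × List String)) (k : String) (x : String) :
    List (String × List String) :=
  d.map (fun p => if p.1 = k then (p.1, p.2 ++ [x]) else p)

def pvStepA (d : List (String × List String)) (raw : String) :
    List (String × List String) :=
  let line := PySem.Str.strip raw
  if line = "" then d
  else if PySem.Str.startswith line "#" then
    pvAppendAt d "comments" (PySem.Str.strip (PySem.Str.slice line (some 1) none))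
  else if PySem.Str.startswith line "!" then
    pvAppendAt d "include" (PySem.Str.slice line (some 1) none)
  else
    pvAppendAt d "exclude" line

def parse_ignore_file_py (content : String) : List (String × List String) :=
  (PySem.Str.splitlines content).foldl pvStepA
    [("include", []), ("exclude", []), ("comments", [])]

-- ===== PORT B =====
def parse_ignore_file_py_alt (content : String) : List (String × List String) :=
  let lines := ((PySem.Str.splitlines content).map PySem.Str.strip).filter (fun l => l ≠ "")
  [("include",
      (lines.filter (fun l => PySem.Str.startswith l "!")).map
        (fun l => PySem.Str.slice l (some 1) none)),
   ("exclude",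
      lines.filter (fun l => !PySem.Str.startswith l "#" && !PySem.Str.startswith l "!")),
   ("comments",
      (lines.filter (fun l => PySem.Str.startswith l "#")).map
        (fun l => PySem.Str.strip (PySem.Str.slice l (some 1) none)))]

-- ===== PRECONDITION & SPEC =====
def Spec_parse_ignore_file_py (content : String) (out : List (String × List String)) : Prop := out = parse_ignore_file_py_alt content
instance (content : String) (out : List (String × List String)) : Decidable (Spec_parse_ignore_file_py content out) := by unfold Spec_parse_ignore_file_py; infer_instance

-- ===== CLAIM (what is proved, stated in full; the proofs are below) =====
def Claim_equal_parse_ignore_file_py : Prop := ∀ (content : String), Dom_parse_ignore_file_py content → Spec_parse_ignore_file_py content (parse_ignore_file_py content)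

-- ===== LEMMAS AND PROOFS =====

-- a line starting with '#' does not start with '!'
theorem pv_hash_not_bang (l : String)
    (h : PySem.Str.startswith l "#" = true) :
    PySem.Str.startswith l "!" = false := by
  simp only [PySem.Str.startswith_eq] at *
  rw [PySem.Chars.startswith_iff] at h
  rcases h with ⟨t, ht⟩
  by_contra hb
  rw [Bool.not_eq_false, PySem.Chars.startswith_iff] at hb
  rcases hb with ⟨t', ht'⟩
  rw [← ht'] at ht
  simp at ht

-- loop invariant: folding A's step from any accumulator appends B's three buckets
theorem pv_loop (ls : List String) (i e c : List String) :
    ls.foldl pvStepA [("include", i), ("exclude", e), ("comments", c)] =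
      let lines := (ls.map PySem.Str.strip).filter (fun l => l ≠ "")
      [("include", i ++ (lines.filter (fun l => PySem.Str.startswith l "!")).map
            (fun l => PySem.Str.slice l (some 1) none)),
       ("exclude", e ++ lines.filter
            (fun l => !PySem.Str.startswith l "#" && !PySem.Str.startswith l "!")),
       ("comments", c ++ (lines.filter (fun l => PySem.Str.startswith l "#")).map
            (fun l => PySem.Str.strip (PySem.Str.slice l (some 1) none)))] := by
  induction ls generalizing i e c with
  | nil => simp
  | cons l ls ih =>
    simp only [List.foldl_cons, List.map_cons, List.filter_cons]
    by_cases h0 : PySem.Str.strip l = ""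
    · simp [pvStepA, h0, ih]
    · by_cases hc : PySem.Str.startswith (PySem.Str.strip l) "#" = true
      · have hb := pv_hash_not_bang _ hc
        have hc' : PySem.Chars.startswith (PySem.Chars.strip l.toList) ['#'] = true := by
          simpa using hc
        have hb' : PySem.Chars.startswith (PySem.Chars.strip l.toList) ['!'] = false := by
          simpa using hb
        simp [pvStepA, pvAppendAt, h0, hc', hb', ih]
      · have hc' : PySem.Chars.startswith (PySem.Chars.strip l.toList) ['#'] = false := by
          simpa using hc
        by_cases hi : PySem.Str.startswith (PySem.Str.strip l) "!" = true
        · have hi' : PySem.Chars.startswith (PySem.Chars.strip l.toList) ['!'] = true := by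
            simpa using hi
          simp [pvStepA, pvAppendAt, h0, hc', hi', ih]
        · have hi' : PySem.Chars.startswith (PySem.Chars.strip l.toList) ['!'] = false := by
            simpa using hi
          simp [pvStepA, pvAppendAt, h0, hc', hi', ih]

-- ===== VERDICT (by name: the statement is the Claim_ definition above) =====
theorem parse_ignore_file_py_spec : Claim_equal_parse_ignore_file_py := by
  intro content _
  unfold Spec_parse_ignore_file_py parse_ignore_file_py parse_ignore_file_py_alt
  simpa using pv_loop (PySem.Str.splitlines content) [] [] []
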